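-- pv_equiv track=rewrite | github.com/ClarenceCorpuz/ISCU4-Classwork | Solutions/Repl.it/04.07 Lists - Scary 13.py | sum_scary_13
-- ===== SOURCE A (Python) =====
-- from typing import List
--
-- def sum_scary_13(numbers: List[int]):
--     sum = 0
--     i = 0
--     while i < len(numbers):
--         if numbers[i] != 13:
--             sum += numbers[i]
--             i += 1
--         else:
--             i += 2
--
--     return sum
-- ===== SOURCE B (Python) =====
-- def sum_scary_13(numbers):
--     total = 0
--     skip_next = False
--     for x in numbers:
--         if skip_next:
--             skip_next = False
--         elif x == 13:
--             skip_next = True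
--         else:
--             total += x
--     return total
-- ===== Notes on version B (the rewrite author's own statement) =====
-- stated objective: idiomatic
-- what changed: Replaces the while loop with manual index jumping (i += 1 / i += 2 and numbers[i] lookups) by a plain for loop over the elements with a skip_next boolean flag.
import Mathlib
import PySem

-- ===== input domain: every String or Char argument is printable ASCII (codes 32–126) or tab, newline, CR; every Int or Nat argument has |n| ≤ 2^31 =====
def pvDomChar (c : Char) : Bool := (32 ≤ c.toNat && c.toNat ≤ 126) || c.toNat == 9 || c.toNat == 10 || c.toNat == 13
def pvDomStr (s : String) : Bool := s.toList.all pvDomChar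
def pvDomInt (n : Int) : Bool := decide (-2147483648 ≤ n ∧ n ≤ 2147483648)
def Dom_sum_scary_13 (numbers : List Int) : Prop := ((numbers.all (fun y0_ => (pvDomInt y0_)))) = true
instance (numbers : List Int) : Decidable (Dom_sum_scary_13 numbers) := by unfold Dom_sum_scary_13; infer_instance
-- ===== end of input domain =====

-- B replaces A's while loop with manual index jumps by a for loop with a skip_next flag (idiomatic, same cost).

-- ===== PORT A =====
-- A's while loop: index i, jumps by 1 (add element) or 2 (skip the 13 and its successor).
def sumScaryLoopA (numbers : List Int) (sum : Int) (i : Nat) : Int :=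
  if h : i < numbers.length then
    if numbers[i] ≠ 13 then
      sumScaryLoopA numbers (sum + numbers[i]) (i + 1)
    else
      sumScaryLoopA numbers sum (i + 2)
  else
    sum
termination_by numbers.length - i

def sum_scary_13 (numbers : List Int) : Int := sumScaryLoopA numbers 0 0

-- ===== PORT B =====
-- B's for loop: fold carrying (total, skip_next).
def sumScaryStep (st : Int × Bool) (x : Int) : Int × Bool :=
  if st.2 then (st.1, false)
  else if x = 13 then (st.1, true)
  else (st.1 + x, false)

def sum_scary_13_alt (numbers : List Int) : Int :=
  (numbers.foldl sumScaryStep (0, false)).1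

-- ===== PRECONDITION & SPEC =====
def Spec_sum_scary_13 (numbers : List Int) (out : Int) : Prop := out = sum_scary_13_alt numbers
instance (numbers : List Int) (out : Int) : Decidable (Spec_sum_scary_13 numbers out) := by unfold Spec_sum_scary_13; infer_instance

-- ===== CLAIM (what is proved, stated in full; the proofs are below) =====
def Claim_equal_sum_scary_13 : Prop := ∀ (numbers : List Int), Dom_sum_scary_13 numbers → Spec_sum_scary_13 numbers (sum_scary_13 numbers)

-- ===== LEMMAS AND PROOFS =====

-- Common reference recursion on the suffix of the list.
def sumScaryAux (l : List Int) (s : Int) : Int :=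
  match l with
  | [] => s
  | x :: xs => if x ≠ 13 then sumScaryAux xs (s + x) else sumScaryAux xs.tail s
termination_by l.length
decreasing_by
  · simp
  · simp [List.length_tail]

theorem loopA_eq_aux (numbers : List Int) :
    ∀ n i sum, numbers.length - i ≤ n →
      sumScaryLoopA numbers sum i = sumScaryAux (numbers.drop i) sum := by
  intro n
  induction n with
  | zero =>
    intro i sum h
    have hi : numbers.length ≤ i := by omega
    rw [sumScaryLoopA]
    simp [Nat.not_lt.mpr hi, List.drop_eq_nil_of_le hi, sumScaryAux]
  | succ n ih =>
    intro i sum h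
    rw [sumScaryLoopA]
    by_cases hi : i < numbers.length
    · rw [List.drop_eq_getElem_cons hi, sumScaryAux]
      by_cases h13 : numbers[i] = 13
      · have ht : (numbers.drop (i + 1)).tail = numbers.drop (i + 2) := by
          rw [← List.drop_drop]
          simp [List.tail_drop]
        simp only [dif_pos hi, h13, ite_not, if_true]
        rw [ht, ih (i + 2) sum (by omega)]
      · simp only [dif_pos hi, ite_not, if_neg h13]
        rw [ih (i + 1) (sum + numbers[i]) (by omega)]
    · simp [hi, List.drop_eq_nil_of_le (Nat.not_lt.mp hi), sumScaryAux]

theorem foldl_eq_aux :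
    ∀ (l : List Int) (s : Int) (b : Bool),
      (l.foldl sumScaryStep (s, b)).1 = sumScaryAux (if b then l.tail else l) s := by
  intro l
  induction l with
  | nil => intro s b; cases b <;> simp [sumScaryAux]
  | cons x xs ih =>
    intro s b
    cases b with
    | true =>
      simp only [List.foldl_cons, sumScaryStep, if_true, List.tail_cons]
      simpa using ih s false
    | false =>
      by_cases h13 : x = 13
      · simp only [List.foldl_cons, sumScaryStep, h13, if_true]
        simp only [Bool.false_eq_true, if_false]
        have := ih s true
        rw [if_pos rfl] at this
        rw [this, sumScaryAux]
        simp
      · simp only [List.foldl_cons, sumScaryStep, if_neg h13]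
        simp only [Bool.false_eq_true, if_false]
        have := ih (s + x) false
        simp only [Bool.false_eq_true, if_false] at this
        rw [this, sumScaryAux, if_pos h13]

-- ===== VERDICT (by name: the statement is the Claim_ definition above) =====
theorem sum_scary_13_spec : Claim_equal_sum_scary_13 := by
  intro numbers _
  unfold Spec_sum_scary_13 sum_scary_13 sum_scary_13_alt
  rw [loopA_eq_aux numbers numbers.length 0 0 (by omega)]
  rw [foldl_eq_aux numbers 0 false]
  simp
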